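-- pv_equiv track=rewrite | github.com/Rajatavaa/MyTransformer | evaluate.py | get_blocked_tokens
-- ===== SOURCE A (Python) =====
-- def get_blocked_tokens(tokens, n=3):
--     if len(tokens) < n:
--         return set()
--
--     seen = {}
--     blocked = set()
--
--     for i in range(len(tokens) - n + 1):
--         ngram = tuple(tokens[i : i + n - 1])
--         next_token = tokens[i + n - 1]
--
--         if ngram in seen:
--             blocked.add(next_token)
--         seen[ngram] = True
--
--     return blocked
-- ===== SOURCE B (Python) =====
-- def get_blocked_tokens(tokens, n=3):
--     positions = range(len(tokens) - n + 1)
--     # pass 1: map each (n-1)-gram prefix to the position of its FIRST occurrence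
--     first = {}
--     for i in positions:
--         key = tuple(tokens[i:i + n - 1])
--         if key not in first:
--             first[key] = i
--     # pass 2: a follower is blocked iff its position is not its prefix's first occurrence
--     blocked = set()
--     for i in positions:
--         if first[tuple(tokens[i:i + n - 1])] != i:
--             blocked.add(tokens[i + n - 1])
--     return blocked
-- ===== Notes on version B (the rewrite author's own statement) =====
-- stated objective: alternative
-- what changed: Replaces A's single pass with an inline seen-flag dict by two staged passes: pass 1 builds a prefix -> first-occurrence-index map over all positions, pass 2 decides blocking purely by comparing each position with the stored first occurrence of its prefix.
import Mathlib
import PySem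

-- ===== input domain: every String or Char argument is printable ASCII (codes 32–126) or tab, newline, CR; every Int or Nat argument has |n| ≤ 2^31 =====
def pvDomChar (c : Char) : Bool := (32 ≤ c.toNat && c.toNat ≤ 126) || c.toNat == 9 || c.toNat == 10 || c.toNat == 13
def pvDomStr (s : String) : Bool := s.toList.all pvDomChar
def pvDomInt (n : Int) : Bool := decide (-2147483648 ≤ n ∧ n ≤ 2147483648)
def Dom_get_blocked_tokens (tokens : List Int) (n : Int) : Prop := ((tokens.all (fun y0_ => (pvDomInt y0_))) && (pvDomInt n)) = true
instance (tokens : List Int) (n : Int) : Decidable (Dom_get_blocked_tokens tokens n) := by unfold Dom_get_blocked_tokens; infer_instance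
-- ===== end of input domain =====

-- B replaces A's single seen-flag pass by two staged passes (prefix -> first-occurrence index, then a blocking pass
-- deciding by position); alternative decomposition, no speed claim.

-- ===== PORT A =====
def get_blocked_tokens (tokens : List Int) (n : Int) : List Int :=
  if (tokens.length : Int) < n then []
  else
    ((PySem.List.pyRange 0 ((tokens.length : Int) - n + 1) 1).foldl
      (fun (st : PySem.Dict (List Int) Bool × PySem.Set Int) i =>
        let ngram := PySem.List.slice tokens (some i) (some (i + n - 1))
        let next_token := PySem.List.pyGetD tokens (i + n - 1) 0
        let blocked := if st.1.contains ngram then st.2.add next_token else st.2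
        (st.1.insert ngram true, blocked))
      (PySem.Dict.empty, PySem.Set.empty)).2

-- ===== PORT B =====
def get_blocked_tokens_alt (tokens : List Int) (n : Int) : List Int :=
  let positions := PySem.List.pyRange 0 ((tokens.length : Int) - n + 1) 1
  -- pass 1: map each (n-1)-gram prefix to the position of its first occurrence
  let first := positions.foldl
    (fun (d : PySem.Dict (List Int) Int) i =>
      let key := PySem.List.slice tokens (some i) (some (i + n - 1))
      if d.contains key then d else d.insert key i)
    PySem.Dict.empty
  -- pass 2: blocked iff the position is not its prefix's first occurrence
  -- (the key is always present in `first`, so the getD default is never used — exact port of first[key])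
  positions.foldl
    (fun (acc : PySem.Set Int) i =>
      if first.getD (PySem.List.slice tokens (some i) (some (i + n - 1))) i ≠ i
      then acc.add (PySem.List.pyGetD tokens (i + n - 1) 0)
      else acc)
    PySem.Set.empty

-- ===== PRECONDITION & SPEC =====
-- Pre_ excludes exactly the inputs on which A raises IndexError (n ≤ 0 with fewer than 1-n tokens,
-- where tokens[i+n-1] falls below -len); on every input A returns on, the claim holds.
def Pre_get_blocked_tokens (tokens : List Int) (n : Int) : Prop := 1 ≤ n ∨ 1 - n ≤ (tokens.length : Int)
instance (tokens : List Int) (n : Int) : Decidable (Pre_get_blocked_tokens tokens n) := by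
  unfold Pre_get_blocked_tokens; infer_instance

def pvWitness_get_blocked_tokens : List Int × Int := ([1, 2, 1, 2, 1], 2)

def Spec_get_blocked_tokens (tokens : List Int) (n : Int) (out : List Int) : Prop := out = get_blocked_tokens_alt tokens n
instance (tokens : List Int) (n : Int) (out : List Int) : Decidable (Spec_get_blocked_tokens tokens n out) := by unfold Spec_get_blocked_tokens; infer_instance

-- ===== CLAIM (what is proved, stated in full; the proofs are below) =====
def Claim_equal_get_blocked_tokens : Prop := ∀ (tokens : List Int) (n : Int), Dom_get_blocked_tokens tokens n → Pre_get_blocked_tokens tokens n → Spec_get_blocked_tokens tokens n (get_blocked_tokens tokens n)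

-- ===== LEMMAS AND PROOFS =====

-- A's loop after k iterations: its blocked set equals the "ideal" fold whose condition is
-- "some earlier position has the same prefix", and its seen dict contains exactly the earlier prefixes.
theorem pv_main (tokens : List Int) (n : Int) (k : Nat) :
    (((PySem.List.pyRange 0 (k : Int) 1).foldl
        (fun (st : PySem.Dict (List Int) Bool × PySem.Set Int) i =>
          let ngram := PySem.List.slice tokens (some i) (some (i + n - 1))
          let next_token := PySem.List.pyGetD tokens (i + n - 1) 0
          let blocked := if st.1.contains ngram then st.2.add next_token else st.2
          (st.1.insert ngram true, blocked))
        (PySem.Dict.empty, PySem.Set.empty)).2 =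
      (PySem.List.pyRange 0 (k : Int) 1).foldl
        (fun (acc : PySem.Set Int) i =>
          if (PySem.List.pyRange 0 i 1).any
              (fun j => PySem.List.slice tokens (some j) (some (j + (n - 1))) ==
                        PySem.List.slice tokens (some i) (some (i + (n - 1))))
          then acc.add (PySem.List.pyGetD tokens (i + (n - 1)) 0)
          else acc)
        PySem.Set.empty) ∧
    (∀ g : List Int,
      ((PySem.List.pyRange 0 (k : Int) 1).foldl
        (fun (st : PySem.Dict (List Int) Bool × PySem.Set Int) i =>
          let ngram := PySem.List.slice tokens (some i) (some (i + n - 1))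
          let next_token := PySem.List.pyGetD tokens (i + n - 1) 0
          let blocked := if st.1.contains ngram then st.2.add next_token else st.2
          (st.1.insert ngram true, blocked))
        (PySem.Dict.empty, PySem.Set.empty)).1.contains g =
      (PySem.List.pyRange 0 (k : Int) 1).any
        (fun j => PySem.List.slice tokens (some j) (some (j + (n - 1))) == g)) := by
  induction k with
  | zero =>
    constructor
    · simp [PySem.List.pyRange_one_eq_nil]
    · intro g; simp [PySem.List.pyRange_one_eq_nil, PySem.Dict.contains_empty]
  | succ k ih =>
    have hsplit : PySem.List.pyRange 0 ((k : Int) + 1) 1 =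
        PySem.List.pyRange 0 (k : Int) 1 ++ [(k : Int)] :=
      PySem.List.pyRange_one_succ_right (by exact_mod_cast Nat.zero_le k)
    have harith : ∀ i : Int, i + (n - 1) = i + n - 1 := fun i => by ring
    push_cast
    rw [hsplit, List.foldl_append, List.foldl_append]
    obtain ⟨ihb, ihs⟩ := ih
    constructor
    · simp only [List.foldl_cons, List.foldl_nil]
      rw [← ihb, ihs]
      simp only [harith]
    · intro g
      simp only [List.foldl_cons, List.foldl_nil]
      rw [List.any_append, PySem.Dict.contains_insert, ihs]
      simp only [List.any_cons, List.any_nil, harith, Bool.or_false]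
      rw [Bool.or_comm]
      congr 1
      exact Bool.coe_iff_coe.mp (by constructor <;> (intro h; exact (beq_iff_eq.mpr (beq_iff_eq.mp h).symm)))

-- B's pass-1 dict after k iterations looks up the FIRST position whose prefix matches.
theorem pv_first (tokens : List Int) (n : Int) (k : Nat) (g : List Int) :
    ((PySem.List.pyRange 0 (k : Int) 1).foldl
        (fun (d : PySem.Dict (List Int) Int) i =>
          let key := PySem.List.slice tokens (some i) (some (i + n - 1))
          if d.contains key then d else d.insert key i)
        PySem.Dict.empty).get? g =
      (PySem.List.pyRange 0 (k : Int) 1).find?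
        (fun j => PySem.List.slice tokens (some j) (some (j + n - 1)) == g) := by
  induction k generalizing g with
  | zero => simp [PySem.List.pyRange_one_eq_nil, PySem.Dict.get?_empty]
  | succ k ih =>
    have hsplit : PySem.List.pyRange 0 ((k : Int) + 1) 1 =
        PySem.List.pyRange 0 (k : Int) 1 ++ [(k : Int)] :=
      PySem.List.pyRange_one_succ_right (by exact_mod_cast Nat.zero_le k)
    push_cast
    rw [hsplit, List.foldl_append, List.find?_append]
    simp only [List.foldl_cons, List.foldl_nil]
    set D := (PySem.List.pyRange 0 (k : Int) 1).foldl
        (fun (d : PySem.Dict (List Int) Int) i =>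
          let key := PySem.List.slice tokens (some i) (some (i + n - 1))
          if d.contains key then d else d.insert key i)
        PySem.Dict.empty with hD
    by_cases hc : D.contains (PySem.List.slice tokens (some (k : Int)) (some ((k : Int) + n - 1))) = true
    · -- earlier occurrence of prefix k exists: dict unchanged
      simp only [hc, if_true]
      rw [ih]
      cases hfind : (PySem.List.pyRange 0 (k : Int) 1).find?
          (fun j => PySem.List.slice tokens (some j) (some (j + n - 1)) == g) with
      | some v => simp [hfind]
      | none =>
        simp only [hfind, Option.none_or]
        simp only [List.find?_cons, List.find?_nil]
        by_cases hg : PySem.List.slice tokens (some (k : Int)) (some ((k : Int) + n - 1)) == g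
        · -- then g's prefix already occurred earlier, contradicting find? = none
          exfalso
          rw [PySem.Dict.contains_eq_isSome_get?, ih] at hc
          have hgeq : PySem.List.slice tokens (some (k : Int)) (some ((k : Int) + n - 1)) = g :=
            beq_iff_eq.mp hg
          rw [hgeq] at hc
          rw [hfind] at hc
          simp at hc
        · simp [hg]
    · -- prefix k is fresh: it is inserted, and find? over the old range fails on it
      rw [if_neg hc]
      have hnone : (PySem.List.pyRange 0 (k : Int) 1).find?
          (fun j => PySem.List.slice tokens (some j) (some (j + n - 1)) ==
            PySem.List.slice tokens (some (k : Int)) (some ((k : Int) + n - 1))) = none := by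
        have := hc
        rw [PySem.Dict.contains_eq_isSome_get?, ih] at this
        cases hfind : (PySem.List.pyRange 0 (k : Int) 1).find?
            (fun j => PySem.List.slice tokens (some j) (some (j + n - 1)) ==
              PySem.List.slice tokens (some (k : Int)) (some ((k : Int) + n - 1))) with
        | some v => rw [hfind] at this; simp at this
        | none => rfl
      by_cases hg : g = PySem.List.slice tokens (some (k : Int)) (some ((k : Int) + n - 1))
      · rw [hg, PySem.Dict.get?_insert_self, hnone]
        simp [List.find?_cons]
      · rw [PySem.Dict.get?_insert_of_ne _ _ hg, ih]
        cases hfind : (PySem.List.pyRange 0 (k : Int) 1).find?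
            (fun j => PySem.List.slice tokens (some j) (some (j + n - 1)) == g) with
        | some v => simp [hfind]
        | none =>
          simp only [hfind, Option.none_or]
          simp only [List.find?_cons, List.find?_nil]
          have : (PySem.List.slice tokens (some (k : Int)) (some ((k : Int) + n - 1)) == g) = false := by
            simp only [beq_eq_false_iff_ne, ne_eq]
            exact fun h => hg h.symm
          simp [this]

-- For a position i inside the range, B's pass-2 condition equals "some earlier position has the same prefix".
theorem pv_cond (tokens : List Int) (n : Int) (N : Nat) (i : Int)
    (h0 : 0 ≤ i) (hi : i < (N : Int)) :
    (decide (((PySem.List.pyRange 0 (N : Int) 1).foldl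
        (fun (d : PySem.Dict (List Int) Int) j =>
          let key := PySem.List.slice tokens (some j) (some (j + n - 1))
          if d.contains key then d else d.insert key j)
        PySem.Dict.empty).getD (PySem.List.slice tokens (some i) (some (i + n - 1))) i ≠ i)) =
    ((PySem.List.pyRange 0 i 1).any
        (fun j => PySem.List.slice tokens (some j) (some (j + n - 1)) ==
                  PySem.List.slice tokens (some i) (some (i + n - 1)))) := by
  rw [PySem.Dict.getD_eq_get?_getD, pv_first]
  have hsplit : PySem.List.pyRange 0 (N : Int) 1 =
      PySem.List.pyRange 0 i 1 ++ PySem.List.pyRange i (N : Int) 1 :=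
    PySem.List.pyRange_one_append 0 i (N : Int) h0 (le_of_lt hi)
  rw [hsplit, List.find?_append]
  cases hfind : (PySem.List.pyRange 0 i 1).find?
      (fun j => PySem.List.slice tokens (some j) (some (j + n - 1)) ==
        PySem.List.slice tokens (some i) (some (i + n - 1))) with
  | some v =>
    -- a strictly earlier match: getD yields v < i, so the condition is true; any is true too
    have hv : v ∈ PySem.List.pyRange 0 i 1 := List.mem_of_find?_eq_some hfind
    have hvlt : v < i := ((PySem.List.mem_pyRange_one).mp hv).2
    have hany : (PySem.List.pyRange 0 i 1).any
        (fun j => PySem.List.slice tokens (some j) (some (j + n - 1)) ==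
          PySem.List.slice tokens (some i) (some (i + n - 1))) = true := by
      refine List.any_eq_true.mpr ⟨v, hv, ?_⟩
      have hpv := List.find?_some hfind
      exact hpv
    simp [hfind, hany, Option.getD]
    omega
  | none =>
    -- no earlier match: find? hits i itself, getD yields i, condition false; any is false
    have hcons : PySem.List.pyRange i (N : Int) 1 = i :: PySem.List.pyRange (i + 1) (N : Int) 1 :=
      PySem.List.pyRange_one_cons hi
    have hany : (PySem.List.pyRange 0 i 1).any
        (fun j => PySem.List.slice tokens (some j) (some (j + n - 1)) ==
          PySem.List.slice tokens (some i) (some (i + n - 1))) = false := by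
      rw [List.any_eq_false]
      intro x hx
      have := List.find?_eq_none.mp hfind x hx
      simpa using this
    simp [hfind, hcons, List.find?_cons, hany, Option.getD]

theorem get_blocked_tokens_spec_aux (tokens : List Int) (n : Int)
    (hpre : Pre_get_blocked_tokens tokens n) :
    get_blocked_tokens tokens n = get_blocked_tokens_alt tokens n := by
  unfold get_blocked_tokens get_blocked_tokens_alt
  by_cases h : (tokens.length : Int) < n
  · have hnil : PySem.List.pyRange 0 ((tokens.length : Int) - n + 1) 1 = [] :=
      PySem.List.pyRange_one_eq_nil (by omega)
    simp [h, hnil, PySem.Set.empty]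
  · have h0 : 0 ≤ (tokens.length : Int) - n + 1 := by omega
    have hk : ((tokens.length : Int) - n + 1) = (((tokens.length : Int) - n + 1).toNat : Int) := by
      omega
    rw [if_neg h]
    simp only []
    rw [hk]
    set N := ((tokens.length : Int) - n + 1).toNat with hN
    have harith : ∀ i : Int, i + (n - 1) = i + n - 1 := fun i => by ring
    rw [(pv_main tokens n N).1]
    apply PySem.List.foldl_congr_mem
    intro acc x hx
    have hx0 : 0 ≤ x := ((PySem.List.mem_pyRange_one).mp hx).1
    have hxN : x < (N : Int) := ((PySem.List.mem_pyRange_one).mp hx).2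
    have hc := pv_cond tokens n N x hx0 hxN
    simp only [harith]
    by_cases hb : (PySem.List.pyRange 0 x 1).any
        (fun j => PySem.List.slice tokens (some j) (some (j + n - 1)) ==
          PySem.List.slice tokens (some x) (some (x + n - 1))) = true
    · rw [hb] at hc
      have := of_decide_eq_true hc
      simp [hb, this]
    · rw [Bool.not_eq_true] at hb
      rw [hb] at hc
      have := of_decide_eq_false hc
      simp [hb, this]

-- ===== VERDICT (by name: the statement is the Claim_ definition above) =====
theorem get_blocked_tokens_spec : Claim_equal_get_blocked_tokens := by
  intro tokens n _ hpre
  unfold Spec_get_blocked_tokens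
  exact get_blocked_tokens_spec_aux tokens n hpre
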